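-- pv_equiv track=rewrite | github.com/Ag3497120/verantyx-v6 | synth_results/007bbfb7.py | transform
-- ===== SOURCE A (Python) =====
-- def transform(grid):
--     """
--     Pattern: Create a 3x3 tiling where each tile position is determined by the input.
--     If input[i][j] is non-zero, place the entire input pattern in that tile position.
--     If input[i][j] is zero, place all zeros in that tile position.
--     """
--     n = len(grid)
--     m = len(grid[0])
--     result = [[0] * (n * m) for _ in range(n * m)]
--
--     for i in range(n):
--         for j in range(m):
--             if grid[i][j] != 0:
--                 # Place the entire input grid in this block
--                 for di in range(n):
--                     for dj in range(m):
--                         result[i * n + di][j * m + dj] = grid[di][dj]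
--
--     return result
-- ===== SOURCE B (Python) =====
-- def transform(grid):
--     n = len(grid)
--     m = len(grid[0])
--     s = n * m
--     return [[grid[r % n][c % m] if grid[r // n][c // m] != 0 else 0
--              for c in range(s)]
--             for r in range(s)]
-- ===== Notes on version B (the rewrite author's own statement) =====
-- stated objective: simpler
-- what changed: A stamps copies of the input grid block-by-block into a pre-allocated mutable result; B computes each output cell directly from its coordinates ((r//n,c//m) selects the gating cell, (r%n,c%m) the copied cell) in a single nested comprehension over output cells.
-- outside the precondition, e.g. on transform([[0], [0], [0]]): A returns [[0, 0, 0], [0, 0, 0], [0, 0, 0]], B raises IndexError; on transform([[1, 0]]): A returns [[1, 0], [0, 0]], B raises IndexError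
import Mathlib
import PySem

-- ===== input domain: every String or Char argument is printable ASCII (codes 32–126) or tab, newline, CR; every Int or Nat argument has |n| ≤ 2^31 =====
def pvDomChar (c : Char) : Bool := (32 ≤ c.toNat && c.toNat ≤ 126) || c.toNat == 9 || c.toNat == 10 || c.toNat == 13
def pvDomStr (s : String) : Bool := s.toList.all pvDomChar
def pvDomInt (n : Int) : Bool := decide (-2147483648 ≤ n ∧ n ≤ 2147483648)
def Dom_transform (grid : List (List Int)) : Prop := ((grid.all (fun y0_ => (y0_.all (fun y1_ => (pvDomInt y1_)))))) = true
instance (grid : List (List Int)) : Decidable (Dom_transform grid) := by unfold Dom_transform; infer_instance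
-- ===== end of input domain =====

-- B computes each output cell directly from its coordinates in one nested comprehension,
-- instead of A's block-stamping of the input into a pre-allocated mutable result.

-- ===== PORT A =====
-- result[x][y] = v  (Python list assignment on an in-range index)
def pvCellSet (res : List (List Int)) (x y : Nat) (v : Int) : List (List Int) :=
  res.set x ((res.getD x []).set y v)

-- the inner two loops of A: place the entire input grid in tile block (i, j)
def pvStampBlock (grid : List (List Int)) (n m i j : Nat) (res : List (List Int)) : List (List Int) :=
  (List.range n).foldl (fun res di =>
    (List.range m).foldl (fun res dj =>
      pvCellSet res (i * n + di) (j * m + dj) ((grid.getD di []).getD dj 0)) res) res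

def transform (grid : List (List Int)) : List (List Int) :=
  (List.range grid.length).foldl (fun res i =>
    (List.range (grid.headD []).length).foldl (fun res j =>
      if (grid.getD i []).getD j 0 ≠ 0 then
        pvStampBlock grid grid.length (grid.headD []).length i j res
      else res) res)
    (List.replicate (grid.length * (grid.headD []).length)
      (List.replicate (grid.length * (grid.headD []).length) (0 : Int)))

-- ===== PORT B =====
def transform_alt (grid : List (List Int)) : List (List Int) :=
  (List.range (grid.length * (grid.headD []).length)).map (fun r =>
    (List.range (grid.length * (grid.headD []).length)).map (fun c =>
      if (grid.getD (r / grid.length) []).getD (c / (grid.headD []).length) 0 ≠ 0 then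
        (grid.getD (r % grid.length) []).getD (c % (grid.headD []).length) 0
      else 0))

-- ===== PRECONDITION & SPEC =====
-- Pre_ excludes the empty grid (A raises IndexError on grid[0]) and grids with a nonempty
-- first row that is not as long as the grid is tall or with a row shorter than that: there
-- A's mismatched row/column strides either raise IndexError or leave accidental zero bands,
-- and B itself raises IndexError on such shapes.
def Pre_transform (grid : List (List Int)) : Prop :=
  grid ≠ [] ∧ (grid.headD [] = [] ∨
    ((grid.headD []).length = grid.length ∧ ∀ row ∈ grid, grid.length ≤ row.length))
instance (grid : List (List Int)) : Decidable (Pre_transform grid) := by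
  unfold Pre_transform; infer_instance

def pvWitness_transform : List (List Int) := [[1, 0], [0, 1]]

def Spec_transform (grid : List (List Int)) (out : List (List Int)) : Prop := out = transform_alt grid
instance (grid : List (List Int)) (out : List (List Int)) : Decidable (Spec_transform grid out) := by unfold Spec_transform; infer_instance

-- ===== CLAIM (what is proved, stated in full; the proofs are below) =====
def Claim_equal_transform : Prop :=
  ∀ (grid : List (List Int)), Dom_transform grid → Pre_transform grid →
    Spec_transform grid (transform grid)

-- ===== LEMMAS AND PROOFS =====
def pvGet (res : List (List Int)) (r c : Nat) : Int := (res.getD r []).getD c 0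

def pvGood (k : Nat) (res : List (List Int)) : Prop :=
  res.length = k ∧ ∀ row ∈ res, row.length = k

def pvVal (grid : List (List Int)) (r c : Nat) : Int := (grid.getD r []).getD c 0

lemma getD_set_list (l : List Int) (i j : Nat) (a d : Int) :
    (l.set i a).getD j d = if i = j ∧ j < l.length then a else l.getD j d := by
  simp only [List.getD_eq_getElem?_getD, List.getElem?_set]
  split_ifs with h1 h2 h3 <;> simp_all

lemma getD_set_listl (l : List (List Int)) (i j : Nat) (a : List Int) :
    (l.set i a).getD j [] = if i = j ∧ j < l.length then a else l.getD j [] := by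
  simp only [List.getD_eq_getElem?_getD, List.getElem?_set]
  split_ifs with h1 h2 h3 <;> simp_all

lemma pvGood_rowlen {k : Nat} {res : List (List Int)} (hg : pvGood k res) {x : Nat}
    (hx : x < k) : (res.getD x []).length = k := by
  obtain ⟨hl, hr⟩ := hg
  rw [List.getD_eq_getElem (hn := by omega)]
  exact hr _ (List.getElem_mem _)

lemma pvGood_cellSet {k : Nat} {res : List (List Int)} (hg : pvGood k res) (x y : Nat)
    (hx : x < k) (v : Int) : pvGood k (pvCellSet res x y v) := by
  obtain ⟨hl, hr⟩ := hg
  refine ⟨by simp [pvCellSet, hl], ?_⟩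
  intro row hrow
  rcases List.mem_or_eq_of_mem_set hrow with h | h
  · exact hr _ h
  · subst h; rw [List.length_set]; exact pvGood_rowlen ⟨hl, hr⟩ hx

lemma pvGet_cellSet {k : Nat} {res : List (List Int)} (hg : pvGood k res)
    (x y : Nat) (v : Int) (hx : x < k) (r c : Nat) :
    pvGet (pvCellSet res x y v) r c = if r = x ∧ c = y ∧ y < k then v else pvGet res r c := by
  have hlen := hg.1
  have hrl := pvGood_rowlen hg hx
  simp only [pvGet, pvCellSet, getD_set_listl]
  by_cases hrx : r = x
  · subst hrx
    rw [if_pos ⟨rfl, by omega⟩, getD_set_list, hrl]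
    split_ifs with h1 h2 <;> first | rfl | omega
  · rw [if_neg (by tauto), if_neg (by tauto)]

lemma block_coord (n j k c : Nat) (hn : 0 < n) (hk : k < n) :
    c = j * n + k ↔ c / n = j ∧ c % n = k := by
  constructor
  · rintro rfl
    have he : j * n + k = k + j * n := by ring
    rw [he, Nat.add_mul_div_right _ _ hn, Nat.add_mul_mod_self_right,
      Nat.div_eq_of_lt hk, Nat.mod_eq_of_lt hk]
    omega
  · rintro ⟨h1, h2⟩
    have h := Nat.div_add_mod c n
    rw [h1, h2] at h
    rw [Nat.mul_comm j n]
    exact h.symm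

lemma cell_lt (n i di : Nat) (hi : i < n) (hdi : di < n) : i * n + di < n * n := by
  calc i * n + di < (i + 1) * n := by
        have : (i + 1) * n = i * n + n := by ring
        omega
    _ ≤ n * n := Nat.mul_le_mul_right n hi

lemma pvRow_fold (grid : List (List Int)) (n i j di k : Nat)
    (hn : 0 < n) (hi : i < n) (hj : j < n) (hdi : di < n) (hk : k ≤ n)
    (res : List (List Int)) (hg : pvGood (n * n) res) :
    pvGood (n * n) ((List.range k).foldl
      (fun res dj => pvCellSet res (i * n + di) (j * n + dj) ((grid.getD di []).getD dj 0)) res)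
    ∧ ∀ r c, r < n * n → c < n * n →
      pvGet ((List.range k).foldl
        (fun res dj => pvCellSet res (i * n + di) (j * n + dj) ((grid.getD di []).getD dj 0)) res) r c
      = if r = i * n + di ∧ c / n = j ∧ c % n < k then (grid.getD di []).getD (c % n) 0
        else pvGet res r c := by
  induction k with
  | zero =>
    refine ⟨by simpa using hg, ?_⟩
    intro r c hr hc
    simp
  | succ k ih =>
    have hk' : k ≤ n := by omega
    obtain ⟨ihg, ihget⟩ := ih hk'
    rw [List.range_succ, List.foldl_append, List.foldl_cons, List.foldl_nil]
    have hx : i * n + di < n * n := cell_lt n i di hi hdi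
    have hklt : k < n := by omega
    have hy : j * n + k < n * n := cell_lt n j k hj hklt
    refine ⟨pvGood_cellSet ihg _ _ hx _, ?_⟩
    intro r c hr hc
    rw [pvGet_cellSet ihg _ _ _ hx, ihget r c hr hc]
    have hco := block_coord n j k c hn hklt
    split_ifs with h1 h2 h3 h4 h5
    · rw [(hco.mp h1.2.1).2]
    · obtain ⟨ha, hb, -⟩ := h1
      have hd := hco.mp hb
      exact absurd ⟨ha, hd.1, by omega⟩ h2
    · rfl
    · exact absurd ⟨h3.1, h3.2.1, by omega⟩ h4
    · exact absurd ⟨h5.1, hco.mpr ⟨h5.2.1, by omega⟩, hy⟩ h1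
    · rfl

lemma pvBlock_fold (grid : List (List Int)) (n i j k : Nat)
    (hn : 0 < n) (hi : i < n) (hj : j < n) (hk : k ≤ n)
    (res : List (List Int)) (hg : pvGood (n * n) res) :
    pvGood (n * n) ((List.range k).foldl
      (fun res di => (List.range n).foldl
        (fun res dj => pvCellSet res (i * n + di) (j * n + dj) ((grid.getD di []).getD dj 0)) res) res)
    ∧ ∀ r c, r < n * n → c < n * n →
      pvGet ((List.range k).foldl
        (fun res di => (List.range n).foldl
          (fun res dj => pvCellSet res (i * n + di) (j * n + dj) ((grid.getD di []).getD dj 0)) res) res) r c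
      = if r / n = i ∧ r % n < k ∧ c / n = j then pvVal grid (r % n) (c % n)
        else pvGet res r c := by
  induction k with
  | zero =>
    refine ⟨by simpa using hg, ?_⟩
    intro r c hr hc
    simp
  | succ k ih =>
    have hk' : k ≤ n := by omega
    obtain ⟨ihg, ihget⟩ := ih hk'
    rw [List.range_succ, List.foldl_append, List.foldl_cons, List.foldl_nil]
    have hklt : k < n := by omega
    obtain ⟨hg', hget'⟩ := pvRow_fold grid n i j k n hn hi hj hklt (le_refl n) _ ihg
    refine ⟨hg', ?_⟩
    intro r c hr hc
    rw [hget' r c hr hc, ihget r c hr hc]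
    have hco := block_coord n i k r hn hklt
    have hcm : c % n < n := Nat.mod_lt _ hn
    split_ifs with h1 h2 h3 h4 h5
    · simp [pvVal, (hco.mp h1.1).2]
    · obtain ⟨ha, hb, -⟩ := h1
      have hd := hco.mp ha
      exact absurd ⟨hd.1, by omega, hb⟩ h2
    · rfl
    · exact absurd ⟨h3.1, by omega, h3.2.2⟩ h4
    · exact absurd ⟨hco.mpr ⟨h5.1, by omega⟩, h5.2.2, hcm⟩ h1
    · rfl

lemma pvStamp_get (grid : List (List Int)) (n i j : Nat)
    (hn : 0 < n) (hi : i < n) (hj : j < n)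
    (res : List (List Int)) (hg : pvGood (n * n) res) :
    pvGood (n * n) (pvStampBlock grid n n i j res)
    ∧ ∀ r c, r < n * n → c < n * n →
      pvGet (pvStampBlock grid n n i j res) r c
      = if r / n = i ∧ r % n < n ∧ c / n = j then pvVal grid (r % n) (c % n)
        else pvGet res r c := by
  have h := pvBlock_fold grid n i j n hn hi hj (le_refl n) res hg
  simp only [pvStampBlock]
  exact h

def pvSpec (grid : List (List Int)) (n i0 j0 r c : Nat) : Int :=
  if (r / n < i0 ∨ (r / n = i0 ∧ c / n < j0)) ∧ pvVal grid (r / n) (c / n) ≠ 0 then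
    pvVal grid (r % n) (c % n)
  else 0

lemma pvSpec_step_ne (grid : List (List Int)) (n i k r c : Nat)
    (h : ¬(r / n = i ∧ c / n = k)) :
    pvSpec grid n i (k + 1) r c = pvSpec grid n i k r c := by
  have hiff : (r / n < i ∨ (r / n = i ∧ c / n < k + 1)) ↔ (r / n < i ∨ (r / n = i ∧ c / n < k)) := by
    omega
  rw [pvSpec, pvSpec, if_congr (by rw [hiff]) rfl rfl]

lemma pvGate_fold (grid : List (List Int)) (n i k : Nat)
    (hn : 0 < n) (hi : i < n) (hk : k ≤ n)
    (res : List (List Int)) (hg : pvGood (n * n) res)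
    (hres : ∀ r c, r < n * n → c < n * n → pvGet res r c = pvSpec grid n i 0 r c) :
    pvGood (n * n) ((List.range k).foldl
      (fun res j => if (grid.getD i []).getD j 0 ≠ 0 then pvStampBlock grid n n i j res else res) res)
    ∧ ∀ r c, r < n * n → c < n * n →
      pvGet ((List.range k).foldl
        (fun res j => if (grid.getD i []).getD j 0 ≠ 0 then pvStampBlock grid n n i j res else res) res) r c
      = pvSpec grid n i k r c := by
  induction k with
  | zero =>
    exact ⟨by simpa using hg, by simpa using hres⟩
  | succ k ih =>
    have hk' : k ≤ n := by omega
    obtain ⟨ihg, ihget⟩ := ih hk'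
    rw [List.range_succ, List.foldl_append, List.foldl_cons, List.foldl_nil]
    have hklt : k < n := by omega
    by_cases hgate : (grid.getD i []).getD k 0 ≠ 0
    · rw [if_pos hgate]
      obtain ⟨hg', hget'⟩ := pvStamp_get grid n i k hn hi hklt _ ihg
      refine ⟨hg', ?_⟩
      intro r c hr hc
      rw [hget' r c hr hc, ihget r c hr hc]
      have hrm : r % n < n := Nat.mod_lt _ hn
      by_cases hb : r / n = i ∧ c / n = k
      · rw [if_pos ⟨hb.1, hrm, hb.2⟩, pvSpec,
          if_pos ⟨Or.inr ⟨hb.1, by omega⟩, by simpa [pvVal, hb.1, hb.2] using hgate⟩]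
      · rw [if_neg (by tauto), pvSpec_step_ne grid n i k r c hb]
    · rw [if_neg hgate]
      refine ⟨ihg, ?_⟩
      intro r c hr hc
      rw [ihget r c hr hc]
      by_cases hb : r / n = i ∧ c / n = k
      · have hval : pvVal grid (r / n) (c / n) = 0 := by
          simp only [pvVal, hb.1, hb.2]
          simpa using not_not.mp hgate
        rw [pvSpec, pvSpec, if_neg (by rw [hval]; simp), if_neg (by rw [hval]; simp)]
      · exact (pvSpec_step_ne grid n i k r c hb).symm

lemma pvInit_good (n : Nat) :
    pvGood (n * n) (List.replicate (n * n) (List.replicate (n * n) (0 : Int))) := by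
  refine ⟨List.length_replicate, ?_⟩
  intro row h
  rw [List.eq_of_mem_replicate h]
  exact List.length_replicate

lemma pvInit_get (n r c : Nat) :
    pvGet (List.replicate (n * n) (List.replicate (n * n) (0 : Int))) r c = 0 := by
  simp only [pvGet, List.getD_eq_getElem?_getD, List.getElem?_replicate]
  split_ifs <;> simp

lemma pvOuter_fold (grid : List (List Int)) (n k : Nat) (hn : 0 < n) (hk : k ≤ n) :
    pvGood (n * n) ((List.range k).foldl
      (fun res i => (List.range n).foldl
        (fun res j => if (grid.getD i []).getD j 0 ≠ 0 then pvStampBlock grid n n i j res else res) res)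
      (List.replicate (n * n) (List.replicate (n * n) (0 : Int))))
    ∧ ∀ r c, r < n * n → c < n * n →
      pvGet ((List.range k).foldl
        (fun res i => (List.range n).foldl
          (fun res j => if (grid.getD i []).getD j 0 ≠ 0 then pvStampBlock grid n n i j res else res) res)
        (List.replicate (n * n) (List.replicate (n * n) (0 : Int)))) r c
      = pvSpec grid n k 0 r c := by
  induction k with
  | zero =>
    refine ⟨by simpa using pvInit_good n, ?_⟩
    intro r c hr hc
    simp only [List.range_zero, List.foldl_nil, pvInit_get, pvSpec]
    rw [if_neg (by rintro ⟨h1 | ⟨-, h1⟩, -⟩ <;> exact absurd h1 (Nat.not_lt_zero _))]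
  | succ k ih =>
    have hk' : k ≤ n := by omega
    obtain ⟨ihg, ihget⟩ := ih hk'
    rw [List.range_succ, List.foldl_append, List.foldl_cons, List.foldl_nil]
    have hklt : k < n := by omega
    obtain ⟨hg', hget'⟩ := pvGate_fold grid n k n hn hklt (le_refl n) _ ihg ihget
    refine ⟨hg', ?_⟩
    intro r c hr hc
    rw [hget' r c hr hc]
    have hcn : c / n < n := by
      rw [Nat.div_lt_iff_lt_mul hn]
      omega
    have hiff : ((r / n < k ∨ (r / n = k ∧ c / n < n)) ∧ pvVal grid (r / n) (c / n) ≠ 0)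
        ↔ ((r / n < k + 1 ∨ (r / n = k + 1 ∧ c / n < 0)) ∧ pvVal grid (r / n) (c / n) ≠ 0) := by
      constructor
      · rintro ⟨h1 | ⟨h1, -⟩, h2⟩
        · exact ⟨Or.inl (Nat.lt_succ_of_lt h1), h2⟩
        · exact ⟨Or.inl (h1 ▸ Nat.lt_succ_self _), h2⟩
      · rintro ⟨h1 | ⟨-, h1⟩, h2⟩
        · rcases Nat.lt_succ_iff_lt_or_eq.mp h1 with h | h
          · exact ⟨Or.inl h, h2⟩
          · exact ⟨Or.inr ⟨h, hcn⟩, h2⟩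
        · exact absurd h1 (Nat.not_lt_zero _)
    rw [pvSpec, pvSpec, if_congr hiff rfl rfl]

lemma good_eq_map (k : Nat) (res : List (List Int)) (hg : pvGood k res)
    (f : Nat → Nat → Int) (h : ∀ r c, r < k → c < k → pvGet res r c = f r c) :
    res = (List.range k).map (fun r => (List.range k).map (fun c => f r c)) := by
  apply List.ext_getElem
  · simp [hg.1]
  · intro r h1 h2
    have hr : r < k := by simpa [hg.1] using h1
    have hrowlen : res[r].length = k := hg.2 _ (List.getElem_mem h1)
    simp only [List.getElem_map, List.getElem_range]
    apply List.ext_getElem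
    · simpa using hrowlen
    · intro c h3 h4
      have hc : c < k := by simpa [hrowlen] using h3
      simp only [List.getElem_map, List.getElem_range]
      rw [← h r c hr hc, pvGet, List.getD_eq_getElem _ _ h1, List.getD_eq_getElem _ _ h3]

lemma transform_eq_alt (grid : List (List Int)) (hne : grid ≠ [])
    (hm : (grid.headD []).length = grid.length) :
    transform grid = transform_alt grid := by
  have hn : 0 < grid.length := List.length_pos_iff.mpr hne
  obtain ⟨hg, hget⟩ := pvOuter_fold grid grid.length grid.length hn (le_refl _)
  have hA : transform grid = (List.range (grid.length * grid.length)).map (fun r =>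
      (List.range (grid.length * grid.length)).map (fun c =>
        pvSpec grid grid.length grid.length 0 r c)) := by
    unfold transform
    rw [hm]
    exact good_eq_map _ _ hg _ hget
  rw [hA]
  unfold transform_alt
  rw [hm]
  apply List.map_congr_left
  intro r hrm
  have hr : r < grid.length * grid.length := List.mem_range.mp hrm
  apply List.map_congr_left
  intro c hcm
  have hc : c < grid.length * grid.length := List.mem_range.mp hcm
  have hrn : r / grid.length < grid.length := by
    rw [Nat.div_lt_iff_lt_mul hn]
    omega
  rw [pvSpec, if_congr (and_iff_right (Or.inl hrn)) rfl rfl]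
  rfl

lemma transform_m0 (grid : List (List Int)) (h0 : grid.headD [] = []) :
    transform grid = transform_alt grid := by
  unfold transform transform_alt
  rw [h0]
  simp

-- ===== VERDICT (by name: the statement is the Claim_ definition above) =====
theorem transform_spec : Claim_equal_transform := by
  intro grid _ hpre
  unfold Spec_transform
  obtain ⟨hne, h0 | ⟨hm, -⟩⟩ := hpre
  · exact transform_m0 grid h0
  · exact transform_eq_alt grid hne hm
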